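-- pv_equiv track=rewrite | github.com/rdo9313/PY110 | exercises/ex.py | solve
-- ===== SOURCE A (Python) =====
-- def solve(lst):
--     alphabet = 'abcdefghijklmnopqrstuvwxyz'
--     result = []
--
--     for string in lst:
--         match = 0
--         for idx, char in enumerate(string.lower()):
--             if char in alphabet:
--                 if idx == alphabet.index(char):
--                     match += 1
--         result.append(match)
--
--     return result
-- ===== SOURCE B (Python) =====
-- def solve(lst):
--     alphabet = 'abcdefghijklmnopqrstuvwxyz'
--     return [sum(1 for c, a in zip(string.lower(), alphabet) if c == a)
--             for string in lst]
-- ===== Notes on version B (the rewrite author's own statement) =====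
-- stated objective: idiomatic
-- what changed: Replaces A's per-character membership test plus alphabet.index lookup with zipping the lowercased string against the alphabet and counting equal pairs in a comprehension.
import Mathlib
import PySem

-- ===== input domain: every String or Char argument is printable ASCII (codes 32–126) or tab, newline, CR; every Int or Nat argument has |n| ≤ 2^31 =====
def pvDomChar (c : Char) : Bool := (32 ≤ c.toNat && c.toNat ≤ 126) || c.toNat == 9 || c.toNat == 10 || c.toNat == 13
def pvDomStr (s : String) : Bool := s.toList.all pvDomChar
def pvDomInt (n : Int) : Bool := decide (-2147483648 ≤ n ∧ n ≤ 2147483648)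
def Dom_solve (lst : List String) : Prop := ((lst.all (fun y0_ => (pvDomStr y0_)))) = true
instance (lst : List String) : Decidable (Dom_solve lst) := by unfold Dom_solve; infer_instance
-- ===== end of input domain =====

-- B replaces A's per-character membership test + alphabet.index lookup by zipping the
-- lowercased string with the alphabet and counting equal pairs (objective: idiomatic).

-- ===== PORT A =====
def alphabetA : List Char := "abcdefghijklmnopqrstuvwxyz".toList

-- Literal port of A: outer loop appends, inner loop over enumerate(string.lower())
-- tests `char in alphabet` (Chars.isIn) and `idx == alphabet.index(char)` (Chars.find;
-- exact here since the branch is guarded by the membership test, so index never raises).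
def solve (lst : List String) : List Int :=
  lst.foldl (fun result string =>
    result ++ [(PySem.List.enumerate (PySem.Chars.lower string.toList) 0).foldl
      (fun m p =>
        if PySem.Chars.isIn [p.2] alphabetA then
          if p.1 == PySem.Chars.find alphabetA [p.2] then m + 1 else m
        else m) (0 : Int)]) []

-- ===== PORT B =====
def alphabetB : List Char := "abcdefghijklmnopqrstuvwxyz".toList

def solve_alt (lst : List String) : List Int :=
  lst.map (fun string =>
    (((PySem.Chars.lower string.toList).zip alphabetB).countP (fun p => p.1 == p.2) : Int))

-- ===== PRECONDITION & SPEC =====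
def Spec_solve (lst : List String) (out : List Int) : Prop := out = solve_alt lst
instance (lst : List String) (out : List Int) : Decidable (Spec_solve lst out) := by unfold Spec_solve; infer_instance

-- ===== CLAIM (what is proved, stated in full; the proofs are below) =====
def Claim_equal_solve : Prop := ∀ (lst : List String), Dom_solve lst → Spec_solve lst (solve lst)

-- ===== LEMMAS AND PROOFS =====

theorem singleton_prefix_iff {α : Type} (c : α) (l : List α) : [c] <+: l ↔ l.head? = some c := by
  cases l with
  | nil => simp
  | cons x t =>
    constructor
    · rintro ⟨u, hu⟩
      simp at hu
      simp [hu.1]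
    · intro h
      simp at h
      exact ⟨t, by simp [h]⟩

theorem singleton_infix_iff {α : Type} (c : α) (l : List α) : [c] <:+: l ↔ c ∈ l := by
  constructor
  · rintro ⟨u, v, h⟩
    subst h; simp
  · intro h
    obtain ⟨u, v, h⟩ := List.append_of_mem h
    exact ⟨u, v, by simp [h]⟩

-- A's inner-loop test at position n equals "the n-th alphabet letter is c".
theorem key_bool (c : Char) (n : Nat) :
    (PySem.Chars.isIn [c] alphabetA && ((n : Int) == PySem.Chars.find alphabetA [c]))
      = (alphabetA[n]? == some c) := by
  have hnd : alphabetA.Nodup := by decide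
  rcases h : (alphabetA[n]? == some c) with _ | _
  · simp only [beq_eq_false_iff_ne, ne_eq] at h
    rcases h1 : PySem.Chars.isIn [c] alphabetA with _ | _
    · simp
    · rcases h2 : ((n : Int) == PySem.Chars.find alphabetA [c]) with _ | _
      · simp
      · exfalso
        simp only [beq_iff_eq] at h2
        have hnn : 0 ≤ PySem.Chars.find alphabetA [c] := by omega
        obtain ⟨hpre, _⟩ := PySem.Chars.find_spec hnn
        rw [singleton_prefix_iff, List.head?_drop] at hpre
        rw [show (PySem.Chars.find alphabetA [c]).toNat = n by omega] at hpre
        exact h hpre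
  · simp only [beq_iff_eq] at h
    have hmem : c ∈ alphabetA := List.mem_of_getElem? h
    have hin : PySem.Chars.isIn [c] alphabetA = true := by
      rw [PySem.Chars.isIn_iff_infix, singleton_infix_iff]; exact hmem
    have hnn : 0 ≤ PySem.Chars.find alphabetA [c] := by
      rw [PySem.Chars.find_nonneg_iff, singleton_infix_iff]; exact hmem
    obtain ⟨hpre, _⟩ := PySem.Chars.find_spec hnn
    rw [singleton_prefix_iff, List.head?_drop] at hpre
    have hlt : n < alphabetA.length := by
      by_contra hge
      simp [List.getElem?_eq_none (by omega : alphabetA.length ≤ n)] at h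
    have hfl : (PySem.Chars.find alphabetA [c]).toNat < alphabetA.length := by
      have := PySem.Chars.find_le_length alphabetA [c]
      by_contra hge
      simp [List.getElem?_eq_none (by omega : alphabetA.length ≤ (PySem.Chars.find alphabetA [c]).toNat)] at hpre
    have heq : (PySem.Chars.find alphabetA [c]).toNat = n :=
      List.getElem?_inj hfl hnd (hpre.trans h.symm)
    simp [hin]; omega

-- Inner loop of A, started at index n, counts exactly the matches of B's zip with drop n.
theorem inner_lemma (t : List Char) (n : Nat) (acc : Int) :
    (PySem.List.enumerate t (n : Int)).foldl
      (fun m p =>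
        if PySem.Chars.isIn [p.2] alphabetA then
          if p.1 == PySem.Chars.find alphabetA [p.2] then m + 1 else m
        else m) acc
    = acc + ((t.zip (alphabetA.drop n)).countP (fun p => p.1 == p.2) : Int) := by
  induction t generalizing n acc with
  | nil => simp [PySem.List.enumerate]
  | cons c t ih =>
    rw [PySem.List.enumerate_cons, List.foldl_cons]
    have hstep : ∀ m : Int,
        (if PySem.Chars.isIn [c] alphabetA then
          if ((n : Int) == PySem.Chars.find alphabetA [c]) then m + 1 else m
        else m) = (if (alphabetA[n]? == some c) then m + 1 else m) := by
      intro m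
      rw [← key_bool]
      rcases PySem.Chars.isIn [c] alphabetA with _ | _ <;>
        rcases ((n : Int) == PySem.Chars.find alphabetA [c]) with _ | _ <;> simp
    simp only [hstep]
    have hcast : ((n : Int) + 1) = ((n + 1 : Nat) : Int) := by push_cast; ring
    rw [hcast, ih]
    by_cases hlt : n < alphabetA.length
    · rw [List.drop_eq_getElem_cons hlt, List.zip_cons_cons, List.countP_cons]
      rw [List.getElem?_eq_getElem hlt]
      rcases hb : (c == alphabetA[n]) with _ | _
      · have : (some alphabetA[n] == some c) = false := by
          simp at hb ⊢; exact fun h => hb h.symm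
        simp [this]
      · have : (some alphabetA[n] == some c) = true := by simp at hb ⊢; exact hb.symm
        simp [this]; ring
    · have hdrop : alphabetA.drop n = [] := List.drop_eq_nil_of_le (by omega)
      have hdrop' : alphabetA.drop (n + 1) = [] := List.drop_eq_nil_of_le (by omega)
      have hno : (alphabetA[n]? == some c) = false := by
        simp [List.getElem?_eq_none (by omega : alphabetA.length ≤ n)]
      rw [hdrop, hdrop', hno]
      simp

-- ===== VERDICT (by name: the statement is the Claim_ definition above) =====
theorem solve_spec : Claim_equal_solve := by
  intro lst _
  unfold Spec_solve solve solve_alt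
  rw [PySem.List.foldl_append_singleton_eq_map]
  simp only [List.nil_append]
  apply List.map_congr_left
  intro s _
  have h := inner_lemma (PySem.Chars.lower s.toList) 0 0
  simp only [Nat.cast_zero, List.drop_zero, zero_add] at h
  rw [h]
  rfl
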